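-- pv_equiv track=rewrite | github.com/Cenze94/LC-QuAD-NoA | Cluster/check_deeppavlov_model_functions.py | get_correct_file_list
-- ===== SOURCE A (Python) =====
-- from typing import List, Any, Dict, Iterator
--
-- def get_correct_file_list(original_list: List[Any]) -> List[Any]:
--     filtered_list = []
--     previous_line = None
--     for element in original_list:
--         if isinstance(element, str) and element == '-|-':
--             # Marker
--             if previous_line == None:
--                 # Empty group, add an empty line
--                 filtered_list.append("")
--             else:
--                 # Add the last line
--                 filtered_list.append(previous_line)
--                 previous_line = None
--         else:
--             # Group line, save in previous_line
--             previous_line = element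
--     return filtered_list
-- ===== SOURCE B (Python) =====
-- def get_correct_file_list(original_list):
--     # Pass 1: cut the list into one group per '-|-' marker (group = lines
--     # since the previous marker); a trailing group with no marker is dropped.
--     groups = []
--     current = []
--     for element in original_list:
--         if isinstance(element, str) and element == '-|-':
--             groups.append(current)
--             current = []
--         else:
--             current.append(element)
--     # Pass 2: each group contributes its last line, or "" if empty / last == None.
--     return ["" if (not g or g[-1] == None) else g[-1] for g in groups]
-- ===== Notes on version B (the rewrite author's own statement) =====
-- stated objective: alternative
-- what changed: B first splits the input into explicit groups cut at each '-|-' marker (dropping the unterminated trailing group) and then maps each group to its last element (or "" if empty), instead of A's single pass that tracks only a running previous_line.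
import Mathlib
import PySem

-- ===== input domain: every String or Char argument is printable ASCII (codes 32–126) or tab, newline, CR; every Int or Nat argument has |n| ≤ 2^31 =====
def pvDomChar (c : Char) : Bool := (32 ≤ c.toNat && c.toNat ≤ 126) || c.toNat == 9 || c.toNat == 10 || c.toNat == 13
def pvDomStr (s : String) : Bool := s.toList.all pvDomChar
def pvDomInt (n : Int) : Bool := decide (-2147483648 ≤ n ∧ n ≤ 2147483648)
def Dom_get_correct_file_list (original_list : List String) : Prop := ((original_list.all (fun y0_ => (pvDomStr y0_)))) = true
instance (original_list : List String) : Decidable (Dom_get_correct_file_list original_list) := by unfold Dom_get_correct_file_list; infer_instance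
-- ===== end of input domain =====

-- B regroups: split at each '-|-' marker into explicit groups, then map each group to its
-- last line ("" for an empty group); A tracks only a running previous_line in one pass.
-- Return value only; no mutation involved.

-- ===== PORT A =====
-- state: (filtered_list, previous_line); elements are String so previous_line : Option String
-- (isinstance(element, str) is always true on this domain).
def get_correct_file_list (original_list : List String) : List String :=
  (original_list.foldl
    (fun (st : List String × Option String) element =>
      if element == "-|-" then
        match st.2 with
        | none => (st.1 ++ [""], st.2)
        | some p => (st.1 ++ [p], none)
      else
        (st.1, some element))
    ([], none)).1

-- ===== PORT B =====
-- pass 1: cut into groups at each marker (trailing unterminated group dropped);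
-- pass 2: map each group to its last element, "" if empty (g[-1] == None never holds
-- for String elements, so that disjunct is statically false here).
def get_correct_file_list_alt (original_list : List String) : List String :=
  let st := original_list.foldl
    (fun (st : List (List String) × List String) element =>
      if element == "-|-" then (st.1 ++ [st.2], [])
      else (st.1, st.2 ++ [element]))
    ([], [])
  st.1.map (fun g => (g.getLast?).getD "")

-- ===== PRECONDITION & SPEC =====
def Spec_get_correct_file_list (original_list : List String) (out : List String) : Prop := out = get_correct_file_list_alt original_list
instance (original_list : List String) (out : List String) : Decidable (Spec_get_correct_file_list original_list out) := by unfold Spec_get_correct_file_list; infer_instance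

-- ===== CLAIM (what is proved, stated in full; the proofs are below) =====
def Claim_equal_get_correct_file_list : Prop := ∀ (original_list : List String), Dom_get_correct_file_list original_list → Spec_get_correct_file_list original_list (get_correct_file_list original_list)

-- ===== LEMMAS AND PROOFS =====

-- Invariant linking the two folds: A's accumulator is the image of B's group list under
-- last-or-empty, and A's previous_line is the last element of B's current group.
theorem gcf_fold_inv (l : List String) (acc : List String) (prev : Option String)
    (groups : List (List String)) (cur : List String)
    (hacc : acc = groups.map (fun g => (g.getLast?).getD ""))
    (hprev : prev = cur.getLast?) :
    (l.foldl
      (fun (st : List String × Option String) element =>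
        if element == "-|-" then
          match st.2 with
          | none => (st.1 ++ [""], st.2)
          | some p => (st.1 ++ [p], none)
        else
          (st.1, some element))
      (acc, prev)).1 =
    ((l.foldl
      (fun (st : List (List String) × List String) element =>
        if element == "-|-" then (st.1 ++ [st.2], [])
        else (st.1, st.2 ++ [element]))
      (groups, cur)).1.map (fun g => (g.getLast?).getD "")) := by
  induction l generalizing acc prev groups cur with
  | nil => simpa using hacc
  | cons e rest ih =>
    simp only [List.foldl_cons]
    by_cases he : e == "-|-"
    · simp only [he, if_true]
      cases hc : cur.getLast? with
      | none =>
        subst hprev hacc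
        rw [hc]
        refine ih _ _ _ _ ?_ rfl
        have : cur = [] := List.getLast?_eq_none_iff.mp hc
        simp [this, hc]
      | some p =>
        subst hprev hacc
        rw [hc]
        refine ih _ _ _ _ ?_ rfl
        simp [hc]
    · simp only [he, if_false]
      exact ih _ _ _ _ hacc (by simp)

-- ===== VERDICT (by name: the statement is the Claim_ definition above) =====
theorem get_correct_file_list_spec : Claim_equal_get_correct_file_list := by
  intro l _
  unfold Spec_get_correct_file_list get_correct_file_list get_correct_file_list_alt
  exact gcf_fold_inv l [] none [] [] (by simp) (by simp)
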